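-- pv_equiv track=rewrite | github.com/michaelmao315/fusionBlaster | split_file.py | find_cut_position
-- ===== SOURCE A (Python) =====
-- def find_cut_position(lines, target_lines):
--     current_read_name = lines[-1].split('\t')[0]
--     cut_position = len(lines) - 1
--
--     while cut_position >= 0:
--         read_name = lines[cut_position].split('\t')[0]
--         if read_name != current_read_name:
--             break
--         cut_position -= 1
--
--     return cut_position + 1
-- ===== SOURCE B (Python) =====
-- def find_cut_position(lines, target_lines):
--     name = lines[-1].split('\t')[0]
--     cut = 0
--     for i, line in enumerate(lines):
--         if line.split('\t')[0] != name:
--             cut = i + 1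
--     return cut
-- ===== Notes on version B (the rewrite author's own statement) =====
-- stated objective: alternative
-- what changed: A scans backward from the end with a while loop and breaks at the first different read name; B makes a single forward enumerate pass recording the last index whose read name differs from the final line's, returning that index plus one.
-- outside the precondition, e.g. on find_cut_position([], 0): A raises IndexError, B raises IndexError
import Mathlib
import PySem

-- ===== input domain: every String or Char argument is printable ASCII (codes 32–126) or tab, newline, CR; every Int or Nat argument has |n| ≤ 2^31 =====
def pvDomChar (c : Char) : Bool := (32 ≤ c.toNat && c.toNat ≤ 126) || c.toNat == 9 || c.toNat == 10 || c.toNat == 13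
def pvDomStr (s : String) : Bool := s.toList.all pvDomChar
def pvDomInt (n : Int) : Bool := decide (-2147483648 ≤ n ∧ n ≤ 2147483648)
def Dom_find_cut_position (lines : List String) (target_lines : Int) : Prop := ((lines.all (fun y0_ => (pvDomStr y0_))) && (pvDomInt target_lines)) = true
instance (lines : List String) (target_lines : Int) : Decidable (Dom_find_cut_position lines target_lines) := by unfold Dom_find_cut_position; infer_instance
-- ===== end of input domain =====

-- B replaces A's backward while-loop by a single forward enumerate pass (alternative decomposition; same result).

-- first field of a line: line.split('\t')[0] (split always yields a nonempty list, so [0] is its head)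
def pvField (s : String) : String := ((PySem.Str.split? s "\t").getD []).headD ""

-- ===== PORT A =====
-- A's 'while cut_position >= 0' loop, recursing on k = cut_position + 1 (k = 0 means cut_position = -1, return -1 + 1 = 0)
def pvLoopA (lines : List String) (cur : String) : Nat → Int
  | 0 => 0
  | k+1 =>
    let read_name := pvField ((PySem.List.pyGet? lines (k : Int)).getD "")
    if read_name ≠ cur then (k : Int) + 1 else pvLoopA lines cur k

def find_cut_position (lines : List String) (target_lines : Int) : Int :=
  match PySem.List.pyGet? lines (-1) with
  | none => 0  -- Python raises IndexError here; excluded by Pre_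
  | some last => pvLoopA lines (pvField last) lines.length

-- ===== PORT B =====
def find_cut_position_alt (lines : List String) (target_lines : Int) : Int :=
  match PySem.List.pyGet? lines (-1) with
  | none => 0  -- Python B raises IndexError here; excluded by Pre_
  | some last =>
    let name := pvField last
    (PySem.List.enumerate lines 0).foldl
      (fun cut p => if pvField p.2 ≠ name then p.1 + 1 else cut) 0

-- ===== PRECONDITION & SPEC =====
-- Pre_ excludes only the empty list, on which both Pythons raise IndexError at lines[-1]
def Pre_find_cut_position (lines : List String) (target_lines : Int) : Prop := lines ≠ []
instance (lines : List String) (target_lines : Int) : Decidable (Pre_find_cut_position lines target_lines) := by unfold Pre_find_cut_position; infer_instance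
def pvWitness_find_cut_position : List String × Int := (["r1\ta", "r2\tb", "r2\tc"], 2)

def Spec_find_cut_position (lines : List String) (target_lines : Int) (out : Int) : Prop := out = find_cut_position_alt lines target_lines
instance (lines : List String) (target_lines : Int) (out : Int) : Decidable (Spec_find_cut_position lines target_lines out) := by unfold Spec_find_cut_position; infer_instance

-- ===== CLAIM (what is proved, stated in full; the proofs are below) =====
def Claim_equal_find_cut_position : Prop := ∀ (lines : List String) (target_lines : Int), Dom_find_cut_position lines target_lines → Pre_find_cut_position lines target_lines → Spec_find_cut_position lines target_lines (find_cut_position lines target_lines)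

-- ===== LEMMAS AND PROOFS =====

-- A's backward scan up to index k-1 equals B's forward fold over the first k enumerated lines
theorem pvLoopA_eq_foldl_take (lines : List String) (cur : String) (k : Nat) (hk : k ≤ lines.length) :
    pvLoopA lines cur k =
      ((PySem.List.enumerate lines 0).take k).foldl
        (fun cut p => if pvField p.2 ≠ cur then p.1 + 1 else cut) 0 := by
  induction k with
  | zero => simp [pvLoopA]
  | succ k ih =>
    have hklt : k < lines.length := by omega
    have htake : (PySem.List.enumerate lines 0).take (k+1)
        = (PySem.List.enumerate lines 0).take k ++ [((k : Int), lines[k])] := by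
      rw [List.take_add_one]
      simp [PySem.List.getElem?_enumerate, List.getElem?_eq_getElem hklt]
    rw [htake, List.foldl_append]
    simp only [pvLoopA, PySem.List.pyGet?_natCast, List.getElem?_eq_getElem hklt,
      Option.getD_some, List.foldl_cons, List.foldl_nil]
    by_cases h : pvField lines[k] ≠ cur
    · simp [h]
    · simp [h, ih (by omega)]

-- ===== VERDICT (by name: the statement is the Claim_ definition above) =====
theorem find_cut_position_spec : Claim_equal_find_cut_position := by
  intro lines target_lines _ hpre
  unfold Spec_find_cut_position find_cut_position find_cut_position_alt
  cases hlast : PySem.List.pyGet? lines (-1) with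
  | none => rfl
  | some last =>
    simp only
    have := pvLoopA_eq_foldl_take lines (pvField last) lines.length le_rfl
    rw [this]
    have hlen : (PySem.List.enumerate lines 0).length = lines.length := by
      simp [PySem.List.length_enumerate]
    rw [← hlen, List.take_length]
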